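-- pv_equiv track=rewrite | github.com/Boikhethelo/python-practice-tests | third_test/assessment_three.py | valid_binary_string
-- ===== SOURCE A (Python) =====
-- def valid_binary_string(s):
--     """Return True if string contains only 0s and 1s."""
--     if not s:
--         return False
--
--     binary_list = list(s)
--     for x in binary_list:
--         if x != "1" and x != "0":
--             return False
--
--     return True
-- ===== SOURCE B (Python) =====
-- def valid_binary_string(s):
--     """Return True if string contains only 0s and 1s."""
--     return len(s) != 0 and s.count("0") + s.count("1") == len(s)
-- ===== Notes on version B (the rewrite author's own statement) =====
-- stated objective: alternative
-- what changed: Replaces the early-exit scan-and-branch loop by an arithmetic identity over staged counting passes: the string is all-binary iff count('0') + count('1') equals its length, with len(s) != 0 reproducing the empty-string False case.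
import Mathlib
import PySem

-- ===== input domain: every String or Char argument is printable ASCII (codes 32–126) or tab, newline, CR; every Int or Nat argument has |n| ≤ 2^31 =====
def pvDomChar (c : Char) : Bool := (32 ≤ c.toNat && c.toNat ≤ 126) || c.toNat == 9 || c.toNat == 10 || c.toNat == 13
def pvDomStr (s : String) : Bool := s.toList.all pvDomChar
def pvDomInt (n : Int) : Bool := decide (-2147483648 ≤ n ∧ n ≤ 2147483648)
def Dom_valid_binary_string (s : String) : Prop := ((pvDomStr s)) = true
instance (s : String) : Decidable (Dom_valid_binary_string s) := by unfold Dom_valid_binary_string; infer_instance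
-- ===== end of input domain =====

-- B replaces A's early-exit scan loop by staged counting passes and an arithmetic length identity.

-- ===== PORT A =====
-- the for-loop over list(s): returns false at the first non-'0'/'1' char, true past the end
def validBinLoop : List Char → Bool
  | [] => true
  | x :: rest => if x ≠ '1' ∧ x ≠ '0' then false else validBinLoop rest

def valid_binary_string (s : String) : Bool :=
  if s.toList.isEmpty then false
  else validBinLoop s.toList

-- ===== PORT B =====
-- len(s) != 0 and s.count("0") + s.count("1") == len(s)
def valid_binary_string_alt (s : String) : Bool :=
  decide (PySem.Str.len s ≠ 0) &&
  decide (PySem.Str.count s "0" + PySem.Str.count s "1" = PySem.Str.len s)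

-- ===== PRECONDITION & SPEC =====
def Spec_valid_binary_string (s : String) (out : Bool) : Prop := out = valid_binary_string_alt s
instance (s : String) (out : Bool) : Decidable (Spec_valid_binary_string s out) := by unfold Spec_valid_binary_string; infer_instance

-- ===== CLAIM (what is proved, stated in full; the proofs are below) =====
def Claim_equal_valid_binary_string : Prop := ∀ (s : String), Dom_valid_binary_string s → Spec_valid_binary_string s (valid_binary_string s)

-- ===== LEMMAS AND PROOFS =====

-- substring count with a single-character needle is the character count
theorem countGo_single (c : Char) (fuel : Nat) (l : List Char) (acc : Nat)
    (h : l.length ≤ fuel) :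
    PySem.Chars.count.go [c] fuel l acc = acc + l.count c := by
  induction fuel generalizing l acc with
  | zero =>
    have : l = [] := List.length_eq_zero_iff.mp (Nat.le_zero.mp h)
    subst this
    simp [PySem.Chars.count.go]
  | succ n ih =>
    cases l with
    | nil => simp [PySem.Chars.count.go]
    | cons x t =>
      simp only [PySem.Chars.count.go]
      by_cases hx : x = c
      · subst hx
        rw [if_pos (by simp [List.isPrefixOf])]
        simp only [List.length_cons, List.length_nil, Nat.zero_add, List.drop_succ_cons,
          List.drop_zero]
        rw [ih _ _ (Nat.le_of_succ_le_succ h)]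
        simp
        omega
      · rw [if_neg (by simp [List.isPrefixOf]; exact fun h => hx h.symm)]
        rw [ih _ _ (Nat.le_of_succ_le_succ h)]
        simp [hx]

theorem count_single (l : List Char) (c : Char) :
    PySem.Chars.count l [c] = l.count c := by
  unfold PySem.Chars.count
  rw [if_neg (by simp)]
  simpa using countGo_single c l.length l 0 le_rfl

-- the two character counts together never exceed the length (the needles differ)
theorem count01_le (l : List Char) : l.count '0' + l.count '1' ≤ l.length := by
  induction l with
  | nil => simp
  | cons x rest ih =>
    simp only [List.count_cons, List.length_cons]
    by_cases h0 : x = '0' <;> by_cases h1 : x = '1' <;> simp_all <;> omega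

-- A's loop accepts exactly when the counting identity holds
theorem validBinLoop_iff (l : List Char) :
    validBinLoop l = true ↔ l.count '0' + l.count '1' = l.length := by
  induction l with
  | nil => simp [validBinLoop]
  | cons x rest ih =>
    have hle := count01_le rest
    simp only [validBinLoop, List.count_cons, List.length_cons]
    by_cases h1 : x = '1'
    · subst h1
      rw [if_neg (by simp)]
      rw [ih]
      simp only [show (('1' : Char) == '0') = false from rfl,
        show (('1' : Char) == '1') = true from rfl]
      simp only [if_true, Bool.false_eq_true, if_false]
      omega
    · by_cases h0 : x = '0'
      · subst h0
        rw [if_neg (by simp)]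
        rw [ih]
        simp only [show (('0' : Char) == '0') = true from rfl,
          show (('0' : Char) == '1') = false from rfl]
        simp only [if_true, Bool.false_eq_true, if_false]
        omega
      · rw [if_pos ⟨h1, h0⟩]
        simp only [beq_iff_eq, if_neg h0, if_neg h1]
        constructor
        · intro hfalse; exact absurd hfalse (by simp)
        · intro hEq; omega

-- ===== VERDICT (by name: the statement is the Claim_ definition above) =====
theorem valid_binary_string_spec : Claim_equal_valid_binary_string := by
  intro s _
  unfold Spec_valid_binary_string valid_binary_string valid_binary_string_alt
  rw [Bool.eq_iff_iff]
  simp only [PySem.Str.count_eq, PySem.Str.len_eq,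
    show ("0" : String).toList = ['0'] from rfl, show ("1" : String).toList = ['1'] from rfl,
    count_single, Bool.and_eq_true, decide_eq_true_eq]
  by_cases hE : s.toList.isEmpty
  · have h0 : s.toList = [] := List.isEmpty_iff.mp hE
    simp [h0]
  · rw [if_neg hE, validBinLoop_iff]
    have hne : s.toList.length ≠ 0 := by
      simpa [List.isEmpty_iff, List.length_eq_zero_iff] using hE
    constructor
    · intro h
      exact ⟨by exact_mod_cast hne, by exact_mod_cast h⟩
    · rintro ⟨-, h⟩
      exact_mod_cast h
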